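-- pv_equiv track=rewrite | github.com/animeshk-me/circuit-paths-enumerator | parser.py | get_inputs_output
-- ===== SOURCE A (Python) =====
-- def get_inputs_output(string, start):
--   inputs = []
--   i = start
--   while(string[i] != ')'):
--     node = ""
--     while(string[i + 1] != ')' and string[i + 1] != ','):
--       i += 1
--       if (string[i] != ' '):
--         node = node + string[i]
--     inputs.append(node)
--     i += 1
--   output = inputs.pop(0);
--   return (inputs, output)
-- ===== SOURCE B (Python) =====
-- def get_inputs_output(string, start):
--   close = string.index(')', start + 1)
--   nodes = [seg.replace(' ', '') for seg in string[start + 1:close].split(',')]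
--   return (nodes[1:], nodes[0])
-- ===== Notes on version B (the rewrite author's own statement) =====
-- stated objective: simpler
-- what changed: Replaces the nested character-by-character while loops with locating the closing ')' once via str.index, slicing out the content, splitting it on ',' and deleting spaces per segment with str.replace.
-- outside the precondition, e.g. on get_inputs_output(')aa', -2): A returns ([], 'a'), B raises ValueError
import Mathlib
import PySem

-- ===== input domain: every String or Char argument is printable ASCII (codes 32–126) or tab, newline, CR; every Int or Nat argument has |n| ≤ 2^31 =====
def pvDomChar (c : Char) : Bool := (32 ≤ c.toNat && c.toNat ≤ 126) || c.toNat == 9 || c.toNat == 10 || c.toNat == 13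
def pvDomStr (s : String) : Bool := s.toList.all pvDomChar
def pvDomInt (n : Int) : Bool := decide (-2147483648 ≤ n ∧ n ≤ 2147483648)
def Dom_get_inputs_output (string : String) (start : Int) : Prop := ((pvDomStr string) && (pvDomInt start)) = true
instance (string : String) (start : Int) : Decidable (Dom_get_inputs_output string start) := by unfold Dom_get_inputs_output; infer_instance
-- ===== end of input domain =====

-- B replaces A's nested index-walking while loops by: find the first ')' after start, slice the
-- content, split on ',' and delete spaces per segment (simpler decomposition, same O(n) cost).


-- ===== PORT A =====
-- inner while loop: while string[i+1] != ')' and string[i+1] != ',': i += 1; if string[i] != ' ': node += string[i]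
-- (fuel makes the index loop total; with the fuel chosen below it never runs out where Python A returns)
def pvA_inner (cs : List Char) : Nat → Int → List Char → Option (Int × List Char)
  | 0, _, _ => none
  | fuel+1, i, node =>
    match PySem.List.pyGet? cs (i + 1) with
    | none => none                                     -- IndexError
    | some c =>
      if c ≠ ')' ∧ c ≠ ',' then
        match PySem.List.pyGet? cs (i + 1) with        -- string[i] after i += 1
        | none => none
        | some c2 => pvA_inner cs fuel (i + 1) (if c2 ≠ ' ' then node ++ [c2] else node)
      else some (i, node)

-- outer while loop: while string[i] != ')': node = ""; <inner>; inputs.append(node); i += 1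
def pvA_outer (cs : List Char) (F : Nat) : Nat → Int → List (List Char) → Option (List (List Char))
  | 0, _, _ => none
  | fuel+1, i, inputs =>
    match PySem.List.pyGet? cs i with
    | none => none                                     -- IndexError
    | some c =>
      if c ≠ ')' then
        match pvA_inner cs F i [] with
        | none => none
        | some (i', node) => pvA_outer cs F fuel (i' + 1) (inputs ++ [node])
      else some inputs

def get_inputs_output (string : String) (start : Int) : List String × String :=
  let cs := string.toList
  let F := cs.length + start.natAbs + 2
  match pvA_outer cs F F start [] with
  | none => ([], "")                                   -- IndexError in Python (outside Pre_)
  | some inputs =>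
    match inputs with
    | [] => ([], "")                                   -- inputs.pop(0) raises IndexError (outside Pre_)
    | o :: rest => (rest.map String.ofList, String.ofList o)

-- ===== PORT B =====
def get_inputs_output_alt (string : String) (start : Int) : List String × String :=
  let cs := string.toList
  let close := PySem.Chars.findFrom cs [')'] (start + 1)   -- string.index(')', start + 1)
  if close = -1 then ([], "")                          -- ValueError in Python (outside Pre_)
  else
    let content := PySem.List.slice cs (some (start + 1)) (some close)
    let nodes := (PySem.Chars.splitOn content [',']).map (fun seg => PySem.Chars.replace seg [' '] [])
    match nodes with
    | [] => ([], "")                                   -- unreachable: split never returns []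
    | o :: rest => (rest.map String.ofList, String.ofList o)

-- ===== PRECONDITION & SPEC =====
-- Pre_ excludes the inputs where A raises (start out of range, string[start] == ')', no ')' after
-- start) and the negative starts, on which A's value comes from Python's negative-index wraparound
-- (a quirk of A's index arithmetic; B reads those positions differently).
def Pre_get_inputs_output (string : String) (start : Int) : Prop :=
  0 ≤ start ∧ start.toNat < string.toList.length ∧
  string.toList[start.toNat]? ≠ some ')' ∧ ')' ∈ string.toList.drop (start.toNat + 1)
instance (string : String) (start : Int) : Decidable (Pre_get_inputs_output string start) := by
  unfold Pre_get_inputs_output; infer_instance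

def pvWitness_get_inputs_output : String × Int := ("f(a, b)", 1)

def Spec_get_inputs_output (string : String) (start : Int) (out : List String × String) : Prop := out = get_inputs_output_alt string start
instance (string : String) (start : Int) (out : List String × String) : Decidable (Spec_get_inputs_output string start out) := by unfold Spec_get_inputs_output; infer_instance

-- ===== CLAIM (what is proved, stated in full; the proofs are below) =====
def Claim_equal_get_inputs_output : Prop := ∀ (string : String) (start : Int), Dom_get_inputs_output string start → Pre_get_inputs_output string start → Spec_get_inputs_output string start (get_inputs_output string start)

-- ===== LEMMAS AND PROOFS =====

-- reference splitter: Python's content.split(',') on the character list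
def pvSp : List Char → List (List Char)
  | [] => [[]]
  | c :: t =>
    if c = ',' then [] :: pvSp t
    else match pvSp t with
         | [] => [[c]]
         | h :: r => (c :: h) :: r

theorem pvSp_ne_nil (l : List Char) : pvSp l ≠ [] := by
  cases l with
  | nil => simp [pvSp]
  | cons c t =>
    simp only [pvSp]
    split
    · simp
    · cases h : pvSp t <;> simp

theorem pvSp_no_comma (l : List Char) (h : ∀ c ∈ l, c ≠ ',') : pvSp l = [l] := by
  induction l with
  | nil => rfl
  | cons c t ih =>
    have hc : c ≠ ',' := h c (by simp)
    simp only [pvSp, if_neg hc]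
    rw [ih (fun x hx => h x (by simp [hx]))]

theorem pvSp_append_comma (seg rest : List Char) (h : ∀ c ∈ seg, c ≠ ',') :
    pvSp (seg ++ ',' :: rest) = seg :: pvSp rest := by
  induction seg with
  | nil => simp [pvSp]
  | cons c t ih =>
    have hc : c ≠ ',' := h c (by simp)
    simp only [List.cons_append, pvSp, if_neg hc]
    rw [ih (fun x hx => h x (by simp [hx]))]

theorem pv_replace_go_space (l : List Char) : ∀ (acc : List Char) (fuel : Nat), l.length ≤ fuel →
    PySem.Chars.replace.go [' '] [] fuel l acc = acc.reverse ++ l.filter (fun c => !(c == ' ')) := by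
  induction l with
  | nil =>
    intro acc fuel _
    cases fuel <;> simp [PySem.Chars.replace.go]
  | cons c t ih =>
    intro acc fuel hf
    cases fuel with
    | zero => simp at hf
    | succ f =>
      have hlen : t.length ≤ f := by simpa using hf
      by_cases hc : c = ' '
      · subst hc
        simp [PySem.Chars.replace.go, List.isPrefixOf, ih _ f hlen]
      · have hp : ([' '].isPrefixOf (c :: t)) = false := by
          simp [List.isPrefixOf]
          exact fun h => absurd h.symm hc
        simp [PySem.Chars.replace.go, hp, ih _ f hlen, hc]

theorem pv_replace_space (l : List Char) :
    PySem.Chars.replace l [' '] [] = l.filter (fun c => !(c == ' ')) := by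
  rw [PySem.Chars.replace]
  simp only [List.isEmpty_cons, if_false, Bool.false_eq_true]
  exact pv_replace_go_space l [] l.length le_rfl


theorem pv_splitOn_go_comma (l : List Char) : ∀ (cur : List Char) (acc : List (List Char)) (fuel : Nat),
    l.length < fuel →
    PySem.Chars.splitOn.go [','] fuel l cur acc =
      acc.reverse ++ (match pvSp l with | [] => [] | h :: r => (cur.reverse ++ h) :: r) := by
  induction l with
  | nil =>
    intro cur acc fuel hf
    cases fuel with
    | zero => omega
    | succ f => simp [PySem.Chars.splitOn.go, pvSp]
  | cons c t ih =>
    intro cur acc fuel hf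
    cases fuel with
    | zero => omega
    | succ f =>
      have hlen : t.length < f := by simpa using hf
      by_cases hc : c = ','
      · subst hc
        rw [show PySem.Chars.splitOn.go [','] (f+1) (',' :: t) cur acc
              = PySem.Chars.splitOn.go [','] f t [] (cur.reverse :: acc) by
            simp [PySem.Chars.splitOn.go, List.isPrefixOf]]
        rw [ih [] (cur.reverse :: acc) f hlen]
        obtain ⟨h, r, hr⟩ : ∃ h r, pvSp t = h :: r := by
          cases hs : pvSp t with
          | nil => exact absurd hs (pvSp_ne_nil t)
          | cons a b => exact ⟨a, b, rfl⟩
        simp [pvSp, hr]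
      · have hp : ([','].isPrefixOf (c :: t)) = false := by
          simp [List.isPrefixOf]
          exact fun h => absurd h.symm hc
        rw [show PySem.Chars.splitOn.go [','] (f+1) (c :: t) cur acc
              = PySem.Chars.splitOn.go [','] f t (c :: cur) acc by
            simp [PySem.Chars.splitOn.go, hp]]
        rw [ih (c :: cur) acc f hlen]
        obtain ⟨h, r, hr⟩ : ∃ h r, pvSp t = h :: r := by
          cases hs : pvSp t with
          | nil => exact absurd hs (pvSp_ne_nil t)
          | cons a b => exact ⟨a, b, rfl⟩
        simp [pvSp, hr, hc]

theorem pv_splitOn_comma (l : List Char) : PySem.Chars.splitOn l [','] = pvSp l := by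
  rw [PySem.Chars.splitOn, pv_splitOn_go_comma l [] [] (l.length+1) (by omega)]
  obtain ⟨h, r, hr⟩ : ∃ h r, pvSp l = h :: r := by
    cases hs : pvSp l with
    | nil => exact absurd hs (pvSp_ne_nil l)
    | cons a b => exact ⟨a, b, rfl⟩
  simp [hr]

-- first-occurrence decomposition
theorem pv_first_split (x : Char) (u : List Char) (h : x ∈ u) :
    ∃ content rest, u = content ++ x :: rest ∧ ∀ c ∈ content, c ≠ x := by
  induction u with
  | nil => cases h
  | cons c t ih =>
    by_cases hc : c = x
    · exact ⟨[], t, by simp [hc], by simp⟩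
    · have ht : x ∈ t := by
        cases List.mem_cons.mp h with
        | inl h1 => exact absurd h1.symm hc
        | inr h1 => exact h1
      obtain ⟨co, re, he, hno⟩ := ih ht
      exact ⟨c :: co, re, by simp [he], by
        intro y hy; rcases List.mem_cons.mp hy with rfl | hy
        · exact hc
        · exact hno y hy⟩
theorem pvA_inner_spec (cs : List Char) (seg : List Char) :
    ∀ (d : Char) (rest node : List Char) (k fuel : Nat),
    List.drop (k+1) cs = seg ++ d :: rest → (∀ c ∈ seg, c ≠ ')' ∧ c ≠ ',') → (d = ')' ∨ d = ',') →
    seg.length + 1 ≤ fuel →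
    pvA_inner cs fuel (k : Int) node =
      some (((k + seg.length : Nat) : Int), node ++ seg.filter (fun c => !(c == ' '))) := by
  induction seg with
  | nil =>
    intro d rest node k fuel hdrop hseg hd hf
    cases fuel with
    | zero => omega
    | succ f =>
      have hget : PySem.List.pyGet? cs ((k : Int) + 1) = some d := by
        have : ((k : Int) + 1) = ((k + 1 : Nat) : Int) := by push_cast; ring
        rw [this, PySem.List.pyGet?_natCast]
        have : cs[k+1]? = (List.drop (k+1) cs)[0]? := by
          rw [List.getElem?_drop]
        rw [this, hdrop]
        simp
      have hcond : ¬ (d ≠ ')' ∧ d ≠ ',') := by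
        rcases hd with rfl | rfl <;> simp
      simp [pvA_inner, hget, hcond]
  | cons a seg' ih =>
    intro d rest node k fuel hdrop hseg hd hf
    cases fuel with
    | zero => omega
    | succ f =>
      have hget : PySem.List.pyGet? cs ((k : Int) + 1) = some a := by
        have : ((k : Int) + 1) = ((k + 1 : Nat) : Int) := by push_cast; ring
        rw [this, PySem.List.pyGet?_natCast]
        have : cs[k+1]? = (List.drop (k+1) cs)[0]? := by rw [List.getElem?_drop]
        rw [this, hdrop]; simp
      have ha := hseg a (by simp)
      have hdrop' : List.drop (k+1+1) cs = seg' ++ d :: rest := by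
        have : List.drop (k+1+1) cs = List.drop 1 (List.drop (k+1) cs) := by
          rw [List.drop_drop]
        rw [this, hdrop]; simp
      have ihr := ih d rest (if a ≠ ' ' then node ++ [a] else node) (k+1) f hdrop'
        (fun c hc => hseg c (by simp [hc])) hd (by simpa using hf)
      have hcast : ((k : Int) + 1) = ((k + 1 : Nat) : Int) := by push_cast; ring
      simp only [pvA_inner, hget, ha.1, ha.2, ne_eq, not_false_iff, and_self, if_true]
      rw [hcast, ihr]
      by_cases hsp : a = ' '
      · simp [hsp, List.filter]
        omega
      · simp [hsp, List.filter]
        constructor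
        · omega
        · have : (!a == ' ') = true := by simp [hsp]
          rw [this]
theorem pvA_outer_spec (cs : List Char) (F : Nat) :
    ∀ (fuel : Nat) (content rest2 : List Char) (k : Nat) (inputs : List (List Char)),
    List.drop (k+1) cs = content ++ ')' :: rest2 → (∀ c ∈ content, c ≠ ')') →
    (∃ c0, cs[k]? = some c0 ∧ c0 ≠ ')') →
    content.length + 2 ≤ fuel → content.length + 2 ≤ F →
    pvA_outer cs F fuel (k : Int) inputs =
      some (inputs ++ (pvSp content).map (fun l => l.filter (fun c => !(c == ' ')))) := by
  intro fuel
  induction fuel with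
  | zero => intro content rest2 k inputs _ _ _ hf _; omega
  | succ f ih =>
    intro content rest2 k inputs hdrop hnop hc0 hf hF
    obtain ⟨c0, hgetk, hc0ne⟩ := hc0
    have hgetkI : PySem.List.pyGet? cs (k : Int) = some c0 := by
      rw [PySem.List.pyGet?_natCast]; exact hgetk
    have hidx : ∀ (m : Nat) (u : List Char), List.drop (k+1) cs = u → cs[k+1+m]? = u[m]? := by
      intro m u hu
      rw [← hu, List.getElem?_drop]
    by_cases hm : ',' ∈ content
    · obtain ⟨seg, c2, he, hnoc⟩ := pv_first_split ',' content hm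
      have hsegp : ∀ c ∈ seg, c ≠ ')' ∧ c ≠ ',' := by
        intro c hcmem
        exact ⟨hnop c (by simp [he, hcmem]), hnoc c hcmem⟩
      have hdrop2 : List.drop (k+1) cs = seg ++ ',' :: (c2 ++ ')' :: rest2) := by
        rw [hdrop, he]; simp
      have hinner := pvA_inner_spec cs seg ',' (c2 ++ ')' :: rest2) [] k F hdrop2 hsegp
        (Or.inr rfl) (by simp [he] at hF ⊢; omega)
      have hlen : content.length = seg.length + 1 + c2.length := by simp [he]; omega
      have hdrop3 : List.drop (k + seg.length + 1 + 1) cs = c2 ++ ')' :: rest2 := by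
        have : k + seg.length + 1 + 1 = (k+1) + (seg.length + 1) := by omega
        rw [this, ← List.drop_drop, hdrop2]
        simp [List.drop_append_of_le_length]
      have hgetc : cs[k + seg.length + 1]? = some ',' := by
        have := hidx seg.length _ hdrop2
        rw [show k + seg.length + 1 = k+1+seg.length by omega, this]
        simp
      have ihr := ih c2 rest2 (k + seg.length + 1) (inputs ++ [seg.filter (fun c => !(c == ' '))])
        hdrop3 (fun c hcm => hnop c (by simp [he, hcm])) ⟨',', hgetc, by decide⟩ (by omega) (by omega)
      simp only [pvA_outer, hgetkI, hc0ne, ne_eq, not_false_iff, if_true, hinner, List.nil_append]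
      rw [show ((k + seg.length : Nat) : Int) + 1 = ((k + seg.length + 1 : Nat) : Int) by push_cast; ring, ihr]
      rw [he, pvSp_append_comma seg c2 hnoc]
      simp
    · have hsegp : ∀ c ∈ content, c ≠ ')' ∧ c ≠ ',' := by
        intro c hcmem
        exact ⟨hnop c hcmem, fun hx => hm (hx ▸ hcmem)⟩
      have hinner := pvA_inner_spec cs content ')' rest2 [] k F hdrop hsegp (Or.inl rfl) (by omega)
      have hgetc : cs[k + content.length + 1]? = some ')' := by
        have := hidx content.length _ hdrop
        rw [show k + content.length + 1 = k+1+content.length by omega, this]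
        simp
      have hgetcI : PySem.List.pyGet? cs ((k + content.length + 1 : Nat) : Int) = some ')' := by
        rw [PySem.List.pyGet?_natCast]; exact hgetc
      simp only [pvA_outer, hgetkI, hc0ne, ne_eq, not_false_iff, if_true, hinner]
      rw [show ((k + content.length : Nat) : Int) + 1 = ((k + content.length + 1 : Nat) : Int) by push_cast; ring]
      cases f with
      | zero => omega
      | succ f' =>
        simp only [pvA_outer, hgetcI]
        rw [pvSp_no_comma content (fun c hcm => fun hx => hm (hx ▸ hcm))]
        simp
theorem pv_find_close (u content rest : List Char) (hu : u = content ++ ')' :: rest)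
    (hnop : ∀ c ∈ content, c ≠ ')') : PySem.Chars.find u [')'] = (content.length : Int) := by
  have hinf : [')'] <:+: u := ⟨content, rest, by simp [hu]⟩
  have hnn : 0 ≤ PySem.Chars.find u [')'] := by
    have h1 := (PySem.Chars.find_ne_neg_one_iff (s := u) (sub := [')'])).mpr hinf
    have h2 := PySem.Chars.neg_one_le_find (s := u) (sub := [')'])
    omega
  obtain ⟨hpref, hmin⟩ := PySem.Chars.find_spec (s := u) (sub := [')']) hnn
  set f := (PySem.Chars.find u [')']).toNat with hfdef
  have hle : f ≤ content.length := by
    by_contra hgt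
    exact hmin content.length (by omega)
      (by rw [hu, List.drop_left]; exact ⟨rest, rfl⟩)
  have hge : ¬ f < content.length := by
    intro hlt2
    obtain ⟨r2, hr2⟩ := hpref
    have hgf : u[f]? = some ')' := by
      have h0 : (List.drop f u)[0]? = u[f]? := by simp [List.getElem?_drop]
      rw [← h0, ← hr2]; rfl
    have hgc : content[f]? = some ')' := by
      rw [hu, List.getElem?_append_left hlt2] at hgf; exact hgf
    exact hnop ')' (List.mem_of_getElem? hgc) rfl
  have hf : f = content.length := by omega
  have hres := Int.toNat_of_nonneg hnn
  omega

-- ===== VERDICT (by name: the statement is the Claim_ definition above) =====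
theorem get_inputs_output_spec : Claim_equal_get_inputs_output := by
  intro string start _hdom hpre
  unfold Spec_get_inputs_output
  obtain ⟨hs0, hlt, hne, hmem⟩ := hpre
  have hstart : start = ((start.toNat : Nat) : Int) := (Int.toNat_of_nonneg hs0).symm
  set cs := string.toList with hcs
  set t := start.toNat with ht
  obtain ⟨content, rest, hu, hnop⟩ := pv_first_split ')' (cs.drop (t+1)) hmem
  have hulen : (cs.drop (t+1)).length = cs.length - (t+1) := by simp
  have hclen : content.length + 1 ≤ cs.length - (t+1) := by
    have h := congrArg List.length hu
    simp at h
    omega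
  have ht1 : t + 1 ≤ cs.length := by omega
  have hc0 : ∃ c0, cs[t]? = some c0 ∧ c0 ≠ ')' := by
    refine ⟨cs[t]'hlt, by simp, ?_⟩
    intro hx
    exact hne (by rw [List.getElem?_eq_getElem hlt, hx])
  have hA := pvA_outer_spec cs (cs.length + start.natAbs + 2) (cs.length + start.natAbs + 2)
    content rest t [] hu hnop hc0 (by omega) (by omega)
  have hfind := pv_find_close (cs.drop (t+1)) content rest hu hnop
  have hfrom : PySem.Chars.findFrom cs [')'] (start + 1) none
      = ((t + 1 + content.length : Nat) : Int) := by
    rw [hstart, show ((t : Nat) : Int) + 1 = ((t + 1 : Nat) : Int) by push_cast; ring,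
      PySem.Chars.findFrom_natCast cs [')'] (t+1) ht1, hfind]
    have hne1 : ((content.length : Nat) : Int) ≠ -1 := by omega
    simp only [if_neg hne1]
    push_cast; ring
  have hslice : PySem.List.slice cs (some (start + 1)) (some ((t + 1 + content.length : Nat) : Int))
      = content := by
    rw [hstart, show ((t : Nat) : Int) + 1 = ((t + 1 : Nat) : Int) by push_cast; ring]
    simp only [PySem.List.slice, PySem.List.clampIdx]
    rw [if_neg (show ¬(((t + 1 : Nat) : Int) < 0) by omega),
      if_neg (show ¬(((t + 1 + content.length : Nat) : Int) < 0) by omega)]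
    simp only [Int.toNat_natCast]
    rw [min_eq_left ht1, min_eq_left (by omega)]
    rw [show t + 1 + content.length - (t + 1) = content.length by omega]
    rw [hu, List.take_left]
  simp only [get_inputs_output, get_inputs_output_alt]
  simp only [← hcs]
  rw [hstart] at hA hfrom hslice ⊢
  rw [hA, hfrom]
  rw [if_neg (show ¬(((t + 1 + content.length : Nat) : Int) = -1) by omega)]
  rw [hslice, pv_splitOn_comma]
  have hmapeq : (pvSp content).map (fun seg => PySem.Chars.replace seg [' '] [])
      = (pvSp content).map (fun l => l.filter (fun c => !(c == ' '))) := by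
    apply List.map_congr_left
    intro seg _
    exact pv_replace_space seg
  rw [hmapeq]
  obtain ⟨h0, r0, hr0⟩ : ∃ h0 r0, pvSp content = h0 :: r0 := by
    cases hs : pvSp content with
    | nil => exact absurd hs (pvSp_ne_nil content)
    | cons a b => exact ⟨a, b, rfl⟩
  rw [hr0]
  simp
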